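-- pv_equiv track=rewrite | github.com/JorgenWan/NestedNER | models/utils.py | get_ner_BIOES
-- ===== SOURCE A (Python) =====
-- def reverse_style(input_string):
--     target_position = input_string.index('[')
--     input_len = len(input_string)
--     output_string = input_string[target_position:input_len] + input_string[0:target_position]
--     return output_string
--
-- def get_ner_BIOES(label_list):
--     # list_len = len(word_list)
--     # assert(list_len == len(label_list)), "word list size unmatch with label list"
--     list_len = len(label_list)
--     begin_label = 'B-'
--     end_label = 'E-'
--     single_label = 'S-'
--     whole_tag = ''
--     index_tag = ''
--     tag_list = []
--     stand_matrix = []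
--     for i in range(0, list_len):
--         # wordlabel = word_list[i]
--         current_label = label_list[i].upper()
--         if begin_label in current_label:
--             if index_tag != '':
--                 tag_list.append(whole_tag + ',' + str(i - 1))
--             whole_tag = current_label.replace(begin_label, "", 1) + '[' + str(i)
--             index_tag = current_label.replace(begin_label, "", 1)
--
--         elif single_label in current_label:
--             if index_tag != '':
--                 tag_list.append(whole_tag + ',' + str(i - 1))
--             whole_tag = current_label.replace(single_label, "", 1) + '[' + str(i)
--             tag_list.append(whole_tag)
--             whole_tag = ""
--             index_tag = ""
--         elif end_label in current_label:
--             if index_tag != '':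
--                 tag_list.append(whole_tag + ',' + str(i))
--             whole_tag = ''
--             index_tag = ''
--         else:
--             continue
--     if (whole_tag != '') & (index_tag != ''):
--         tag_list.append(whole_tag)
--     tag_list_len = len(tag_list)
--
--     for i in range(0, tag_list_len):
--         if len(tag_list[i]) > 0:
--             tag_list[i] = tag_list[i] + ']'
--             insert_list = reverse_style(tag_list[i])
--             stand_matrix.append(insert_list)
--     # print stand_matrix
--     return stand_matrix
-- ===== SOURCE B (Python) =====
-- def get_ner_BIOES(label_list):
--     # Two-stage algorithm: (1) tokenize the label sequence into an event list
--     # (position, kind, entity-type); (2) pair each event with its successor via zip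
--     # and emit every span at its OPENING event using one-event lookahead.
--     events = []
--     for i, lab in enumerate(label_list):
--         cur = lab.upper()
--         if 'B-' in cur:
--             events.append((i, 'B', cur.replace('B-', '', 1)))
--         elif 'S-' in cur:
--             events.append((i, 'S', cur.replace('S-', '', 1)))
--         elif 'E-' in cur:
--             events.append((i, 'E', ''))
--     out = []
--     for (i, kind, typ), nxt in zip(events, events[1:] + [None]):
--         if kind == 'B':
--             if nxt is None:
--                 out.append('[%d]%s' % (i, typ))
--             else:
--                 end = nxt[0] if nxt[1] == 'E' else nxt[0] - 1
--                 out.append('[%d,%d]%s' % (i, end, typ))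
--         elif kind == 'S':
--             out.append('[%d]%s' % (i, typ))
--     return out
-- ===== Notes on version B (the rewrite author's own statement) =====
-- stated objective: alternative
-- what changed: B is a two-stage algorithm: it first tokenizes the labels into an event list (position, kind, type), then zips each event with its successor and emits every span at its OPENING event by one-event lookahead, replacing A's close-at-event state machine with its packed 'TYPE[start' string state and its whole second reverse_style rotation pass.
-- outside the precondition, e.g. on get_ner_BIOES(['B-A[B']): A returns ['[B[0]A'], B returns ['[0]A[B']; on get_ner_BIOES(['B-']): A returns [], B returns ['[0]']
import Mathlib
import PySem

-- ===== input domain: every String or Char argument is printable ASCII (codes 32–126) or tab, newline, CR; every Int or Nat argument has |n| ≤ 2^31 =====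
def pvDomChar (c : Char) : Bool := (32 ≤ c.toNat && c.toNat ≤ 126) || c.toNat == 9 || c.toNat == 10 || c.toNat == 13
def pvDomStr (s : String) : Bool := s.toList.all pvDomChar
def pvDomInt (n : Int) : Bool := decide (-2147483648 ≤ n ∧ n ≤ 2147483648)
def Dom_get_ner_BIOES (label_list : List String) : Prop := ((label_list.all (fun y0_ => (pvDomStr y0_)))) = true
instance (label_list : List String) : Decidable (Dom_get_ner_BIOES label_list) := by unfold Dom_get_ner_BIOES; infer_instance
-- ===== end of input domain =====

-- B replaces A's close-at-event state machine (packed 'TYPE[start' string state plus a second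
-- reverse_style rotation pass) by a two-stage algorithm: tokenize into an event list, then zip
-- each event with its successor and emit every span at its opening event; equivalence is proved
-- on the Pre_ domain below. Objective: alternative (same O(n) cost, different algorithm).

-- ===== PORT A =====
-- Python str.replace(old, new, 1): replace only the first occurrence (used by both Pythons).
-- Exact hand port: PySem.Chars.replace has no count parameter.
def pvReplace1 (s old new : List Char) : List Char :=
  let k := PySem.Chars.find s old
  if k = -1 then s else s.take k.toNat ++ new ++ s.drop (k.toNat + old.length)

-- reverse_style. Python's .index('[') raises if '[' is absent; every string A passes here contains
-- '[' by construction, and on strings containing '[', .index = Chars.find (exact there).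
def pvReverseStyle (input_string : List Char) : List Char :=
  let target_position := PySem.Chars.find input_string ['[']
  let input_len := PySem.Chars.len input_string
  PySem.Chars.slice input_string (some target_position) (some input_len) ++
    PySem.Chars.slice input_string (some 0) (some target_position)

-- loop body of A's first pass; state = (whole_tag, index_tag, tag_list), p = (i, label_list[i])
def pvStepA (st : List Char × List Char × List (List Char)) (p : Int × String) :
    List Char × List Char × List (List Char) :=
  let whole_tag := st.1
  let index_tag := st.2.1
  let tag_list := st.2.2
  let current_label := PySem.Chars.upper p.2.toList
  if PySem.Chars.isIn "B-".toList current_label then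
    let tag_list := if index_tag ≠ [] then
        tag_list ++ [whole_tag ++ ',' :: PySem.Int.toChars (p.1 - 1)] else tag_list
    (pvReplace1 current_label "B-".toList [] ++ '[' :: PySem.Int.toChars p.1,
     pvReplace1 current_label "B-".toList [], tag_list)
  else if PySem.Chars.isIn "S-".toList current_label then
    let tag_list := if index_tag ≠ [] then
        tag_list ++ [whole_tag ++ ',' :: PySem.Int.toChars (p.1 - 1)] else tag_list
    let whole_tag := pvReplace1 current_label "S-".toList [] ++ '[' :: PySem.Int.toChars p.1
    ([], [], tag_list ++ [whole_tag])
  else if PySem.Chars.isIn "E-".toList current_label then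
    ([], [],
     if index_tag ≠ [] then tag_list ++ [whole_tag ++ ',' :: PySem.Int.toChars p.1] else tag_list)
  else st

def get_ner_BIOES (label_list : List String) : List String :=
  let list_len := PySem.List.len label_list
  let st := (PySem.List.pyRange 0 list_len).foldl
      (fun st i => pvStepA st (i, PySem.List.pyGetD label_list i "")) ([], [], [])
  let tag_list := if st.1 ≠ [] ∧ st.2.1 ≠ [] then st.2.2 ++ [st.1] else st.2.2
  (PySem.List.pyRange 0 (PySem.List.len tag_list)).foldl
      (fun sm i =>
        if PySem.Chars.len (PySem.List.pyGetD tag_list i []) > 0 then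
          sm ++ [String.ofList (pvReverseStyle (PySem.List.pyGetD tag_list i [] ++ [']']))]
        else sm) []

-- ===== PORT B =====
-- stage 1 of B: the event-list builder (body of Source B's first loop)
def pvEvStep (ev : List (Int × Char × List Char)) (p : Int × String) :
    List (Int × Char × List Char) :=
  let cur := PySem.Chars.upper p.2.toList
  if PySem.Chars.isIn "B-".toList cur then ev ++ [(p.1, 'B', pvReplace1 cur "B-".toList [])]
  else if PySem.Chars.isIn "S-".toList cur then ev ++ [(p.1, 'S', pvReplace1 cur "S-".toList [])]
  else if PySem.Chars.isIn "E-".toList cur then ev ++ [(p.1, 'E', ([] : List Char))]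
  else ev

-- stage 2 of B: body of Source B's zip loop; pe = (event, successor event or None)
def pvEmitB (out : List String) (pe : (Int × Char × List Char) × Option (Int × Char × List Char)) :
    List String :=
  let i := pe.1.1
  let kind := pe.1.2.1
  let typ := pe.1.2.2
  if kind = 'B' then
    match pe.2 with
    | none => out ++ [String.ofList ('[' :: PySem.Int.toChars i ++ ']' :: typ)]
    | some nxt =>
      let e := if nxt.2.1 = 'E' then nxt.1 else nxt.1 - 1
      out ++ [String.ofList ('[' :: PySem.Int.toChars i ++ ',' :: PySem.Int.toChars e ++ ']' :: typ)]
  else if kind = 'S' then out ++ [String.ofList ('[' :: PySem.Int.toChars i ++ ']' :: typ)]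
  else out

def get_ner_BIOES_alt (label_list : List String) : List String :=
  let events := (PySem.List.enumerate label_list).foldl pvEvStep []
  (events.zip ((events.drop 1).map some ++ [none])).foldl pvEmitB []

-- ===== PRECONDITION & SPEC =====
-- Pre_ excludes two kinds of unspecified-corner labels on which both programs still return:
-- (a) a label containing '[' that can open a span (contains 'B-' or 'S-' after upper-casing) —
-- A packs type and indices into one string and rotates it at the FIRST '[', so a '[' inside the
-- entity type makes A's split point (and hence its output shape) an accident of the packing;
-- (b) a bare 'B-' label (empty entity type) — whether it opens a span is anybody's choice:
-- A's index_tag guard silently drops the opener, B emits an empty-typed span.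
def Pre_get_ner_BIOES (label_list : List String) : Prop :=
  ∀ s ∈ label_list,
    (PySem.Str.isIn "[" s = false ∨
      (PySem.Str.isIn "B-" (PySem.Str.upper s) = false ∧
       PySem.Str.isIn "S-" (PySem.Str.upper s) = false)) ∧
    PySem.Str.upper s ≠ "B-"
instance (label_list : List String) : Decidable (Pre_get_ner_BIOES label_list) := by
  unfold Pre_get_ner_BIOES; infer_instance

def pvWitness_get_ner_BIOES : List String := ["B-PER", "I-PER", "E-PER", "O", "S-LOC", "B-ORG"]

def Spec_get_ner_BIOES (label_list : List String) (out : List String) : Prop :=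
  out = get_ner_BIOES_alt label_list
instance (label_list : List String) (out : List String) : Decidable (Spec_get_ner_BIOES label_list out) := by
  unfold Spec_get_ner_BIOES; infer_instance

-- ===== CLAIM (what is proved, stated in full; the proofs are below) =====
def Claim_equal_get_ner_BIOES : Prop := ∀ (label_list : List String),
  Dom_get_ner_BIOES label_list → Pre_get_ner_BIOES label_list →
  Spec_get_ner_BIOES label_list (get_ner_BIOES label_list)

-- ===== LEMMAS AND PROOFS =====

-- A's second pass, as a map (all of A's tag_list entries are nonempty)
def pvPost (T : List (List Char)) : List String :=
  T.map (fun t => String.ofList (pvReverseStyle (t ++ [']'])))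

theorem pv_find_lb {cs : List Char} (rest : List Char) (h : '[' ∉ cs) :
    PySem.Chars.find (cs ++ '[' :: rest) ['['] = (cs.length : Int) := by
  have hin : ('[' : Char) ∈ cs ++ '[' :: rest := by simp
  have hnn : 0 ≤ PySem.Chars.find (cs ++ '[' :: rest) ['['] := by
    rw [PySem.Chars.find_nonneg_iff, List.singleton_infix_iff]; exact hin
  obtain ⟨hpre, hmin⟩ := PySem.Chars.find_spec hnn
  set k := (PySem.Chars.find (cs ++ '[' :: rest) ['[']).toNat with hk
  have hat : ∀ i < cs.length, ¬ ([ '[' ] <+: (cs ++ '[' :: rest).drop i) := by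
    intro i hi hp
    have : ((cs ++ '[' :: rest).drop i).head? = some '[' := by
      rcases hp with ⟨t, ht⟩; rw [← ht]; rfl
    have hg : (cs ++ '[' :: rest)[i]? = some '[' := by
      rwa [← List.head?_drop]
    have : cs[i]? = some '[' := by
      rwa [List.getElem?_append_left hi] at hg
    exact h (List.mem_of_getElem? this)
  have hclen : ([ '[' ] <+: (cs ++ '[' :: rest).drop cs.length) := by
    rw [List.drop_append_of_le_length (le_refl _)]
    simp
  have h1 : ¬ (cs.length < k) := fun hlt => hmin _ hlt hclen
  have h2 : ¬ (k < cs.length) := fun hlt => hat k hlt hpre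
  have : k = cs.length := by omega
  omega

theorem pv_rot {cs : List Char} (rest : List Char) (h : '[' ∉ cs) :
    pvReverseStyle (cs ++ '[' :: rest) = ('[' :: rest) ++ cs := by
  unfold pvReverseStyle
  simp only [pv_find_lb rest h, PySem.Chars.len, PySem.Chars.slice_eq_listSlice]
  rw [PySem.List.slice_toNat _ (by positivity) (by positivity),
      PySem.List.slice_toNat _ le_rfl (by positivity)]
  have : (((cs.length : Int)) + ((rest.length : Int) + 1)).toNat - cs.length = rest.length + 1 := by omega
  simp [List.drop_append_of_le_length, this, List.take_of_length_le]

theorem pv_upper_lb {cs : List Char} (h : '[' ∉ cs) : '[' ∉ PySem.Chars.upper cs := by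
  simp only [PySem.Chars.upper, List.mem_map]
  rintro ⟨c, hc, hcu⟩
  by_cases hl : PySem.Chars.islower c
  · simp only [PySem.Chars.upperChar, hl, if_true] at hcu
    have hb : 97 ≤ c.toNat ∧ c.toNat ≤ 122 := by
      simp only [PySem.Chars.islower, Bool.and_eq_true, decide_eq_true_eq] at hl
      exact ⟨hl.1, hl.2⟩
    have hval : Nat.isValidChar (c.toNat - 32) := by
      left; omega
    have hv : (Char.ofNat (c.toNat - 32)).toNat = c.toNat - 32 := by
      rw [Char.toNat_ofNat, if_pos hval]
    have := congrArg Char.toNat hcu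
    rw [hv] at this
    have h91 : ('[' : Char).toNat = 91 := rfl
    omega
  · simp only [PySem.Chars.upperChar, hl] at hcu
    exact h (hcu ▸ hc)

theorem pv_rep_lb {s : List Char} (old : List Char) (h : '[' ∉ s) : '[' ∉ pvReplace1 s old [] := by
  unfold pvReplace1
  by_cases hk : PySem.Chars.find s old = -1
  · simpa [hk] using h
  · simp only [hk, if_false]
    intro hm
    simp only [List.append_nil, List.mem_append] at hm
    rcases hm with hm | hm
    · exact h (List.mem_of_mem_take hm)
    · exact h (List.mem_of_mem_drop hm)

-- replace(old,'',1) gives '' only when the whole string IS old (old found, length 2 here)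
theorem pv_rep_nil {s : List Char} {old : List Char} (hfind : 0 ≤ PySem.Chars.find s old)
    (hrep : pvReplace1 s old [] = []) : s = old := by
  have hne : PySem.Chars.find s old ≠ -1 := by omega
  obtain ⟨hpre, _⟩ := PySem.Chars.find_spec hfind
  set k := (PySem.Chars.find s old).toNat with hk
  unfold pvReplace1 at hrep
  simp only [hne, if_false, List.append_nil, List.append_eq_nil_iff] at hrep
  obtain ⟨htake, hdrop⟩ := hrep
  have hslen : s.length ≤ k + old.length := by
    have := congrArg List.length hdrop
    simp at this
    omega
  have hk0 : k = 0 ∨ s = [] := by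
    rcases List.take_eq_nil_iff.mp htake with h | h
    · left; exact h
    · right; exact h
  have hsne : s ≠ [] ∨ old = [] := by
    by_cases ho : old = []
    · right; exact ho
    · left
      intro hs
      subst hs
      rcases hpre with ⟨t, ht⟩
      simp at ht
      exact ho ht.1
  rcases hk0 with hk0 | hs0
  · rw [hk0, List.drop_zero] at hpre
    rcases hpre with ⟨t, ht⟩
    have hlen : old.length + t.length = s.length := by
      have := congrArg List.length ht; simpa using this
    have ht0 : t = [] := List.length_eq_zero_iff.mp (by omega)
    rw [ht0, List.append_nil] at ht
    exact ht.symm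
  · subst hs0
    rcases hpre with ⟨t, ht⟩
    simp at ht
    simp [ht.1]

theorem pv_post_append (T : List (List Char)) (t : List Char) :
    pvPost (T ++ [t]) = pvPost T ++ [String.ofList (pvReverseStyle (t ++ [']']))] := by
  simp [pvPost]

theorem pv_pass2 (T : List (List Char)) (acc : List String) (hT : ∀ t ∈ T, t ≠ []) :
    T.foldl (fun sm t =>
        if PySem.Chars.len t > 0 then sm ++ [String.ofList (pvReverseStyle (t ++ [']']))] else sm)
      acc = acc ++ pvPost T := by
  induction T generalizing acc with
  | nil => simp [pvPost]
  | cons t T ih =>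
    have ht : t ≠ [] := hT t (by simp)
    have hlen : PySem.Chars.len t > 0 := by
      simp only [PySem.Chars.len]
      exact_mod_cast List.length_pos_iff.mpr ht
    simp only [List.foldl_cons, if_pos hlen]
    rw [ih _ (fun u hu => hT u (by simp [hu]))]
    simp [pvPost]

-- the event a label produces, if any (classification shared by both ports' branch structure)
def pvEvOf (p : Int × String) : Option (Int × Char × List Char) :=
  let cur := PySem.Chars.upper p.2.toList
  if PySem.Chars.isIn "B-".toList cur then some (p.1, 'B', pvReplace1 cur "B-".toList [])
  else if PySem.Chars.isIn "S-".toList cur then some (p.1, 'S', pvReplace1 cur "S-".toList [])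
  else if PySem.Chars.isIn "E-".toList cur then some (p.1, 'E', [])
  else none

theorem pv_evstep (ev : List (Int × Char × List Char)) (p : Int × String) :
    pvEvStep ev p = ev ++ (pvEvOf p).toList := by
  simp only [pvEvStep, pvEvOf]
  split_ifs <;> simp

theorem pv_events_eq (ps : List (Int × String)) (acc : List (Int × Char × List Char)) :
    ps.foldl pvEvStep acc = acc ++ ps.filterMap pvEvOf := by
  induction ps generalizing acc with
  | nil => simp
  | cons p ps ih =>
    rw [List.foldl_cons, pv_evstep, ih, List.filterMap_cons]
    cases pvEvOf p <;> simp

-- A's first-pass step, restricted to events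
def pvStepAEv (st : List Char × List Char × List (List Char)) (e : Int × Char × List Char) :
    List Char × List Char × List (List Char) :=
  let w := st.1
  let x := st.2.1
  let T := st.2.2
  if e.2.1 = 'B' then
    (e.2.2 ++ '[' :: PySem.Int.toChars e.1, e.2.2,
     if x ≠ [] then T ++ [w ++ ',' :: PySem.Int.toChars (e.1 - 1)] else T)
  else if e.2.1 = 'S' then
    ([], [], (if x ≠ [] then T ++ [w ++ ',' :: PySem.Int.toChars (e.1 - 1)] else T) ++
      [e.2.2 ++ '[' :: PySem.Int.toChars e.1])
  else if e.2.1 = 'E' then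
    ([], [], if x ≠ [] then T ++ [w ++ ',' :: PySem.Int.toChars e.1] else T)
  else st

theorem pv_stepA_ev (st : List Char × List Char × List (List Char)) (p : Int × String) :
    pvStepA st p = ((pvEvOf p).map (pvStepAEv st)).getD st := by
  obtain ⟨w, x, T⟩ := st
  simp only [pvStepA, pvEvOf]
  split_ifs <;> simp only [pvStepAEv, Option.map_some, Option.getD_some, Option.map_none,
    Option.getD_none] <;> split_ifs <;> simp_all

theorem pv_foldA (ps : List (Int × String)) (st : List Char × List Char × List (List Char)) :
    ps.foldl pvStepA st = (ps.filterMap pvEvOf).foldl pvStepAEv st := by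
  induction ps generalizing st with
  | nil => simp
  | cons p ps ih =>
    rw [List.foldl_cons, pv_stepA_ev, List.filterMap_cons]
    cases pvEvOf p <;> simp [ih]

-- the close string emitted for a still-open span (j, u), given the remaining events
def pvClose (opt : Option (Int × List Char)) (E : List (Int × Char × List Char)) : List String :=
  match opt with
  | none => []
  | some ju =>
    match E with
    | [] => [String.ofList ('[' :: PySem.Int.toChars ju.1 ++ ']' :: ju.2)]
    | e :: _ => [String.ofList ('[' :: PySem.Int.toChars ju.1 ++
        ',' :: PySem.Int.toChars (if e.2.1 = 'E' then e.1 else e.1 - 1) ++ ']' :: ju.2)]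

-- the full output from event list E with open span opt, in A's emission order
def pvBOut (opt : Option (Int × List Char)) : List (Int × Char × List Char) → List String
  | [] => pvClose opt []
  | e :: es =>
    pvClose opt (e :: es) ++
    (if e.2.1 = 'S' then [String.ofList ('[' :: PySem.Int.toChars e.1 ++ ']' :: e.2.2)] else []) ++
    pvBOut (if e.2.1 = 'B' then some (e.1, e.2.2) else none) es

-- B's second loop in opener-attribution order
def pvBRec : List (Int × Char × List Char) → List String
  | [] => []
  | e :: es => pvEmitB [] (e, es.head?) ++ pvBRec es

theorem pv_emit_append (out : List String)
    (pe : (Int × Char × List Char) × Option (Int × Char × List Char)) :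
    pvEmitB out pe = out ++ pvEmitB [] pe := by
  obtain ⟨⟨i, k, t⟩, o⟩ := pe
  simp only [pvEmitB]
  split_ifs <;> cases o <;> simp

theorem pv_zipfold (evs : List (Int × Char × List Char)) (acc : List String) :
    (evs.zip ((evs.drop 1).map some ++ [none])).foldl pvEmitB acc = acc ++ pvBRec evs := by
  induction evs generalizing acc with
  | nil => simp [pvBRec]
  | cons e es ih =>
    cases es with
    | nil =>
      rw [show ([e].zip ((([e] : List (Int × Char × List Char)).drop 1).map some ++ [none]))
            = [(e, none)] from rfl]
      rw [List.foldl_cons, List.foldl_nil, pv_emit_append]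
      simp [pvBRec]
    | cons e' es' =>
      simp only [List.drop_succ_cons, List.drop_zero, List.map_cons, List.cons_append,
        List.zip_cons_cons, List.foldl_cons]
      rw [pv_emit_append]
      have hrec := ih (acc ++ pvEmitB [] (e, some e'))
      simp only [List.drop_succ_cons, List.drop_zero] at hrec
      rw [hrec]
      simp [pvBRec]

-- regrouping: B's opener-attribution order = A's close-at-event order
theorem pv_regroup (E : List (Int × Char × List Char)) (opt : Option (Int × List Char)) :
    pvClose opt E ++ pvBRec E = pvBOut opt E := by
  induction E generalizing opt with
  | nil => simp [pvBRec, pvBOut]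
  | cons e es ih =>
    have key : pvEmitB [] (e, es.head?) =
        (if e.2.1 = 'S' then [String.ofList ('[' :: PySem.Int.toChars e.1 ++ ']' :: e.2.2)] else []) ++
        pvClose (if e.2.1 = 'B' then some (e.1, e.2.2) else none) es := by
      obtain ⟨i, k, t⟩ := e
      cases es <;> simp only [pvEmitB, pvClose, List.head?] <;> split_ifs <;> simp_all
    show pvClose opt (e :: es) ++ (pvEmitB [] (e, es.head?) ++ pvBRec es) = _
    rw [key, pvBOut, ← ih]
    simp

-- the state A's fold is in: open span opt (start, type) and emitted tag list T
def pvStOf (opt : Option (Int × List Char)) (T : List (List Char)) :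
    List Char × List Char × List (List Char) :=
  match opt with
  | none => ([], [], T)
  | some ju => (ju.2 ++ '[' :: PySem.Int.toChars ju.1, ju.2, T)

def pvOK (opt : Option (Int × List Char)) : Prop :=
  ∀ ju, opt = some ju → ju.2 ≠ [] ∧ '[' ∉ ju.2

def pvGood (e : Int × Char × List Char) : Prop :=
  (e.2.1 = 'B' → e.2.2 ≠ [] ∧ '[' ∉ e.2.2) ∧ (e.2.1 = 'S' → '[' ∉ e.2.2) ∧
  (e.2.1 = 'B' ∨ e.2.1 = 'S' ∨ e.2.1 = 'E')

def pvDangle (opt : Option (Int × List Char)) : List (List Char) :=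
  match opt with
  | none => []
  | some ju => [ju.2 ++ '[' :: PySem.Int.toChars ju.1]

-- core invariant: running A's event steps from state (opt, T) ends in some state (opt', T'),
-- and the rotated output of T' plus the dangling tag equals pvPost T followed by pvBOut opt E
theorem pv_core (E : List (Int × Char × List Char)) (hE : ∀ e ∈ E, pvGood e) :
    ∀ (opt : Option (Int × List Char)) (T : List (List Char)), pvOK opt → (∀ t ∈ T, t ≠ []) →
    ∃ opt' T', E.foldl pvStepAEv (pvStOf opt T) = pvStOf opt' T' ∧ pvOK opt' ∧
      (∀ t ∈ T', t ≠ []) ∧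
      pvPost (T' ++ pvDangle opt') = pvPost T ++ pvBOut opt E := by
  induction E with
  | nil =>
    intro opt T hopt hT
    refine ⟨opt, T, rfl, hopt, hT, ?_⟩
    cases opt with
    | none => simp [pvDangle, pvBOut, pvClose]
    | some ju =>
      obtain ⟨hne, hlb⟩ := hopt ju rfl
      simp only [pvDangle, pvBOut, pvClose, pv_post_append]
      rw [show (ju.2 ++ '[' :: PySem.Int.toChars ju.1) ++ [']'] =
            ju.2 ++ '[' :: (PySem.Int.toChars ju.1 ++ [']']) by simp]
      rw [pv_rot _ hlb]
      simp
  | cons e es ih =>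
    intro opt T hopt hT
    obtain ⟨i, k, t⟩ := e
    obtain ⟨hgB, hgS, hgK⟩ := hE (i, k, t) (by simp)
    have hes : ∀ e ∈ es, pvGood e := fun e he => hE e (by simp [he])
    rcases hgK with hk | hk | hk
    all_goals subst hk
    · -- B event
      obtain ⟨htne, htlb⟩ := hgB rfl
      cases opt with
      | none =>
        obtain ⟨opt', T', hfold, hok, hT', hout⟩ :=
          ih hes (some (i, t)) T (by rintro ju rfl2; cases rfl2; exact ⟨htne, htlb⟩) hT
        refine ⟨opt', T', ?_, hok, hT', ?_⟩
        · rw [List.foldl_cons, show pvStepAEv (pvStOf none T) (i, 'B', t) =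
              pvStOf (some (i, t)) T by simp [pvStepAEv, pvStOf]]
          exact hfold
        · rw [hout]
          simp [pvBOut, pvClose]
      | some ju =>
        obtain ⟨hne, hlb⟩ := hopt ju rfl
        have hT2 : ∀ u ∈ T ++ [(ju.2 ++ '[' :: PySem.Int.toChars ju.1) ++
            ',' :: PySem.Int.toChars (i - 1)], u ≠ [] := by
          intro u hu
          rcases List.mem_append.mp hu with hu | hu
          · exact hT u hu
          · simp only [List.mem_singleton] at hu; subst hu; simp
        obtain ⟨opt', T', hfold, hok, hT', hout⟩ :=
          ih hes (some (i, t))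
            (T ++ [(ju.2 ++ '[' :: PySem.Int.toChars ju.1) ++ ',' :: PySem.Int.toChars (i - 1)])
            (by rintro ju2 rfl2; cases rfl2; exact ⟨htne, htlb⟩) hT2
        refine ⟨opt', T', ?_, hok, hT', ?_⟩
        · rw [List.foldl_cons, show pvStepAEv (pvStOf (some ju) T) (i, 'B', t) =
              pvStOf (some (i, t)) (T ++ [(ju.2 ++ '[' :: PySem.Int.toChars ju.1) ++
                ',' :: PySem.Int.toChars (i - 1)]) by simp [pvStepAEv, pvStOf, hne]]
          exact hfold
        · rw [hout, pv_post_append]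
          rw [show ((ju.2 ++ '[' :: PySem.Int.toChars ju.1) ++ ',' :: PySem.Int.toChars (i - 1)) ++ [']'] =
                ju.2 ++ '[' :: (PySem.Int.toChars ju.1 ++ ',' :: PySem.Int.toChars (i - 1) ++ [']']) by simp]
          rw [pv_rot _ hlb]
          simp [pvBOut, pvClose]
    · -- S event
      have htlb := hgS rfl
      cases opt with
      | none =>
        have hT2 : ∀ u ∈ T ++ [t ++ '[' :: PySem.Int.toChars i], u ≠ [] := by
          intro u hu
          rcases List.mem_append.mp hu with hu | hu
          · exact hT u hu
          · simp only [List.mem_singleton] at hu; subst hu; simp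
        obtain ⟨opt', T', hfold, hok, hT', hout⟩ :=
          ih hes none (T ++ [t ++ '[' :: PySem.Int.toChars i]) (by rintro ju h; cases h) hT2
        refine ⟨opt', T', ?_, hok, hT', ?_⟩
        · rw [List.foldl_cons, show pvStepAEv (pvStOf none T) (i, 'S', t) =
              pvStOf none (T ++ [t ++ '[' :: PySem.Int.toChars i]) by simp [pvStepAEv, pvStOf]]
          exact hfold
        · rw [hout, pv_post_append]
          rw [show (t ++ '[' :: PySem.Int.toChars i) ++ [']'] =
                t ++ '[' :: (PySem.Int.toChars i ++ [']']) by simp]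
          rw [pv_rot _ htlb]
          simp [pvBOut, pvClose]
      | some ju =>
        obtain ⟨hne, hlb⟩ := hopt ju rfl
        have hT2 : ∀ u ∈ (T ++ [(ju.2 ++ '[' :: PySem.Int.toChars ju.1) ++
            ',' :: PySem.Int.toChars (i - 1)]) ++ [t ++ '[' :: PySem.Int.toChars i], u ≠ [] := by
          intro u hu
          rcases List.mem_append.mp hu with hu | hu
          · rcases List.mem_append.mp hu with hu | hu
            · exact hT u hu
            · simp only [List.mem_singleton] at hu; subst hu; simp
          · simp only [List.mem_singleton] at hu; subst hu; simp
        obtain ⟨opt', T', hfold, hok, hT', hout⟩ :=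
          ih hes none ((T ++ [(ju.2 ++ '[' :: PySem.Int.toChars ju.1) ++
            ',' :: PySem.Int.toChars (i - 1)]) ++ [t ++ '[' :: PySem.Int.toChars i])
            (by rintro ju2 h; cases h) hT2
        refine ⟨opt', T', ?_, hok, hT', ?_⟩
        · rw [List.foldl_cons, show pvStepAEv (pvStOf (some ju) T) (i, 'S', t) =
              pvStOf none ((T ++ [(ju.2 ++ '[' :: PySem.Int.toChars ju.1) ++
                ',' :: PySem.Int.toChars (i - 1)]) ++ [t ++ '[' :: PySem.Int.toChars i])
              by simp [pvStepAEv, pvStOf, hne]]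
          exact hfold
        · rw [hout, pv_post_append, pv_post_append]
          rw [show ((ju.2 ++ '[' :: PySem.Int.toChars ju.1) ++ ',' :: PySem.Int.toChars (i - 1)) ++ [']'] =
                ju.2 ++ '[' :: (PySem.Int.toChars ju.1 ++ ',' :: PySem.Int.toChars (i - 1) ++ [']']) by simp]
          rw [show (t ++ '[' :: PySem.Int.toChars i) ++ [']'] =
                t ++ '[' :: (PySem.Int.toChars i ++ [']']) by simp]
          rw [pv_rot _ hlb, pv_rot _ htlb]
          simp [pvBOut, pvClose]
    · -- E event
      cases opt with
      | none =>
        obtain ⟨opt', T', hfold, hok, hT', hout⟩ := ih hes none T (by rintro ju h; cases h) hT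
        refine ⟨opt', T', ?_, hok, hT', ?_⟩
        · rw [List.foldl_cons, show pvStepAEv (pvStOf none T) (i, 'E', t) =
              pvStOf none T by simp [pvStepAEv, pvStOf]]
          exact hfold
        · rw [hout]
          simp [pvBOut, pvClose]
      | some ju =>
        obtain ⟨hne, hlb⟩ := hopt ju rfl
        have hT2 : ∀ u ∈ T ++ [(ju.2 ++ '[' :: PySem.Int.toChars ju.1) ++
            ',' :: PySem.Int.toChars i], u ≠ [] := by
          intro u hu
          rcases List.mem_append.mp hu with hu | hu
          · exact hT u hu
          · simp only [List.mem_singleton] at hu; subst hu; simp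
        obtain ⟨opt', T', hfold, hok, hT', hout⟩ :=
          ih hes none (T ++ [(ju.2 ++ '[' :: PySem.Int.toChars ju.1) ++
            ',' :: PySem.Int.toChars i]) (by rintro ju2 h; cases h) hT2
        refine ⟨opt', T', ?_, hok, hT', ?_⟩
        · rw [List.foldl_cons, show pvStepAEv (pvStOf (some ju) T) (i, 'E', t) =
              pvStOf none (T ++ [(ju.2 ++ '[' :: PySem.Int.toChars ju.1) ++
                ',' :: PySem.Int.toChars i]) by simp [pvStepAEv, pvStOf, hne]]
          exact hfold
        · rw [hout, pv_post_append]
          rw [show ((ju.2 ++ '[' :: PySem.Int.toChars ju.1) ++ ',' :: PySem.Int.toChars i) ++ [']'] =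
                ju.2 ++ '[' :: (PySem.Int.toChars ju.1 ++ ',' :: PySem.Int.toChars i ++ [']']) by simp]
          rw [pv_rot _ hlb]
          simp [pvBOut, pvClose]

-- all events produced from a Pre_-admissible label list are good
theorem pv_events_good (label_list : List String) (hpre : Pre_get_ner_BIOES label_list) :
    ∀ e ∈ (PySem.List.enumerate label_list).filterMap pvEvOf, pvGood e := by
  intro e he
  rw [List.mem_filterMap] at he
  obtain ⟨p, hp, hev⟩ := he
  rcases (PySem.List.mem_enumerate_iff _ _ _).mp hp with ⟨k, hk, rfl⟩
  obtain ⟨hbr, hnb⟩ := hpre _ (List.getElem_mem hk)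
  set s := label_list[k] with hs
  have hlb : PySem.Str.isIn "[" s = false → '[' ∉ PySem.Chars.upper s.toList := by
    intro h
    apply pv_upper_lb
    simp only [PySem.Str.isIn_eq] at h
    rw [PySem.Chars.isIn_eq_false_iff] at h
    intro hm
    exact h (by simpa [List.singleton_infix_iff] using hm)
  simp only [pvEvOf] at hev
  split_ifs at hev with h1 h2 h3
  · -- B event
    cases hev
    refine ⟨fun _ => ⟨?_, ?_⟩, fun h => by simp at h, Or.inl rfl⟩
    · -- type nonempty: otherwise upper s = "B-"
      intro hnil
      have : PySem.Chars.upper s.toList = "B-".toList := by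
        apply pv_rep_nil _ hnil
        rw [PySem.Chars.find_nonneg_iff]
        exact (PySem.Chars.isIn_iff_infix _ _).mp h1
      apply hnb
      apply String.toList_inj.mp
      rw [PySem.Str.toList_upper]
      exact this
    · -- no '[' in the type
      rcases hbr with hbr | ⟨hbr, _⟩
      · exact pv_rep_lb _ (hlb hbr)
      · rw [show PySem.Str.isIn "B-" (PySem.Str.upper s) =
            PySem.Chars.isIn "B-".toList (PySem.Chars.upper s.toList) by
              simp [PySem.Str.isIn_eq, PySem.Str.toList_upper]] at hbr
        rw [hbr] at h1
        cases h1
  · -- S event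
    cases hev
    refine ⟨fun h => by simp at h, fun _ => ?_, Or.inr (Or.inl rfl)⟩
    rcases hbr with hbr | ⟨_, hbr⟩
    · exact pv_rep_lb _ (hlb hbr)
    · rw [show PySem.Str.isIn "S-" (PySem.Str.upper s) =
          PySem.Chars.isIn "S-".toList (PySem.Chars.upper s.toList) by
            simp [PySem.Str.isIn_eq, PySem.Str.toList_upper]] at hbr
      rw [hbr] at h2
      cases h2
  · -- E event
    cases hev
    exact ⟨fun h => by simp at h, fun h => by simp at h, Or.inr (Or.inr rfl)⟩

-- ===== VERDICT (by name: the statement is the Claim_ definition above) =====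
theorem get_ner_BIOES_spec : Claim_equal_get_ner_BIOES := by
  intro label_list _hdom hpre
  simp only [Spec_get_ner_BIOES, get_ner_BIOES, get_ner_BIOES_alt]
  set E := (PySem.List.enumerate label_list).filterMap pvEvOf with hE
  have hfold :
      (PySem.List.pyRange 0 (PySem.List.len label_list)).foldl
          (fun st i => pvStepA st (i, PySem.List.pyGetD label_list i "")) ([], [], [])
        = (PySem.List.enumerate label_list).foldl pvStepA ([], [], []) := by
    rw [PySem.List.enumerate_eq_map_pyRange label_list "", List.foldl_map]
  rw [hfold, pv_foldA, ← hE]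
  obtain ⟨opt', T', hst, hok, hT', hout⟩ :=
    pv_core E (pv_events_good label_list hpre) none [] (by rintro ju h; cases h) (by simp)
  rw [show ((([], [], []) : List Char × List Char × List (List Char)) = pvStOf none []) from rfl, hst]
  have hcond : (if (pvStOf opt' T').1 ≠ [] ∧ (pvStOf opt' T').2.1 ≠ []
      then (pvStOf opt' T').2.2 ++ [(pvStOf opt' T').1] else (pvStOf opt' T').2.2)
      = T' ++ pvDangle opt' := by
    cases opt' with
    | none => simp [pvStOf, pvDangle]
    | some ju =>
      obtain ⟨hne, _⟩ := hok ju rfl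
      simp [pvStOf, pvDangle, hne]
  rw [hcond]
  have hnn : ∀ t ∈ T' ++ pvDangle opt', t ≠ [] := by
    intro u hu
    rcases List.mem_append.mp hu with hu | hu
    · exact hT' u hu
    · cases opt' with
      | none => cases hu
      | some ju => simp only [pvDangle, List.mem_singleton] at hu; subst hu; simp
  have hpass := (PySem.List.foldl_pyRange_pyGetD (T' ++ pvDangle opt') ([] : List Char)
      (fun sm t => if PySem.Chars.len t > 0
        then sm ++ [String.ofList (pvReverseStyle (t ++ [']']))] else sm)
      ([] : List String) (le_refl 0)).trans (by simpa using pv_pass2 (T' ++ pvDangle opt') [] hnn)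
  rw [hpass]
  have hB : (PySem.List.enumerate label_list).foldl pvEvStep [] = E := by
    rw [pv_events_eq, List.nil_append]
  rw [hB, pv_zipfold]
  have hreg : pvBRec E = pvBOut none E := by
    simpa [pvClose] using pv_regroup E none
  rw [List.nil_append, hreg]
  simpa using hout
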